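-- pv_equiv track=rewrite | github.com/SvenAnton/py_basics | ex09_get_recc/get_recc.py | names_to_be_eliminated
-- ===== SOURCE A (Python) =====
-- def names_to_be_eliminated(points_dict: dict, names: set = None, lowest_score: int = None) -> set:
--     """
--     Recursively find the names that are to be eliminated.
--
--     When two or more people have the same lowest score, return a list in which every lowest
--     scoring person is listed.
--
--     :param points_dict: dictionary containing name strings as
--                         keys and points integers as values.
--     :param names: helper to store current names
--     :param lowest_score: helper to store current lowest score
--     :return: set of names of lowest scoring people.
--     """
--     if names is None:
--         names = set()
--     else:
--         names = names
--
--     if len(points_dict) == 0: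
--         return names
--
--     if lowest_score is None:
--         lowest_score = list(points_dict.values())[0]
--         for name, points in points_dict.items():
--             if points <= lowest_score:
--                 lowest_score = points
--     else:
--         lowest_score = lowest_score
--
--     first_name_in_dict = list(points_dict.keys())[0]
--     first_value_in_dict = list(points_dict.values())[0]
--
--     if first_value_in_dict == lowest_score:
--         names.add(first_name_in_dict)
--     names_to_be_eliminated({i: points_dict[i] for i in points_dict if i != first_name_in_dict}, names, lowest_score)
--
--     #return "".join(names) if len(names) < 2 else list(names)
--     return names
-- ===== SOURCE B (Python) =====
-- def names_to_be_eliminated(points_dict: dict, names: set = None, lowest_score: int = None) -> set: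
--     """One-pass re-implementation: find the target score (given threshold or the
--     minimum of the values) once, then add every name that scores it."""
--     if names is None:
--         names = set()
--     if points_dict:
--         target = min(points_dict.values()) if lowest_score is None else lowest_score
--         for name, points in points_dict.items():
--             if points == target:
--                 names.add(name)
--     return names
-- ===== Notes on version B (the rewrite author's own statement) =====
-- stated objective: faster
-- what changed: Replaces A's recursion (which rebuilds the remaining dict on every step and re-finds the minimum) with a single min() followed by one pass that adds every name scoring the target value.
import Mathlib
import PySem

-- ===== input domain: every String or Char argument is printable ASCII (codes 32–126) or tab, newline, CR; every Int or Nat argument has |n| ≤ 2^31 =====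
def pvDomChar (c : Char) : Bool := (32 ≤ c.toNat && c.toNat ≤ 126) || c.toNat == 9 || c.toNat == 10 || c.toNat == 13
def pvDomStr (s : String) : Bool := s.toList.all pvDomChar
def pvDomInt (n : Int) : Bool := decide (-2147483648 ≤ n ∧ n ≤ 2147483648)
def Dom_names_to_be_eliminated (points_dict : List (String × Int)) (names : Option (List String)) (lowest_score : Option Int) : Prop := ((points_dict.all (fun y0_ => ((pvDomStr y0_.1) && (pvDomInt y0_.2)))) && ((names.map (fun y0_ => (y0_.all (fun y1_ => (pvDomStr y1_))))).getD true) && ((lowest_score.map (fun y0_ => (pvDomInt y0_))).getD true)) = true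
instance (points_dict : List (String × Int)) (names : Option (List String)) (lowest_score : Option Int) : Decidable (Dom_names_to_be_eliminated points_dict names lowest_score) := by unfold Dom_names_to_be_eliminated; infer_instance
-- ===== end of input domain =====

-- B replaces A's recursion (which rebuilds the remaining dict each step) with one min() plus one pass (faster);
-- both A and B add to a caller-supplied `names` set in place identically — the theorems are about the return value.

-- ===== PORT A =====
def names_to_be_eliminated (points_dict : List (String × Int)) (names : Option (List String)) (lowest_score : Option Int) : List String :=
  let names0 : PySem.Set String :=
    match names with
    | none => PySem.Set.empty
    | some s => s
  if points_dict.length = 0 then names0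
  else
    let lowest : Int :=
      match lowest_score with
      | none =>
        -- lowest_score = list(points_dict.values())[0]; for name, points in …: if points <= lowest_score: lowest_score = points
        points_dict.foldl (fun acc p => if p.2 ≤ acc then p.2 else acc) ((points_dict.map Prod.snd).headI)
      | some l => l
    let firstName : String := (points_dict.map Prod.fst).headI
    let firstValue : Int := (points_dict.map Prod.snd).headI
    let names1 := if firstValue = lowest then PySem.Set.add names0 firstName else names0
    -- {i: points_dict[i] for i in points_dict if i != first_name_in_dict}
    names_to_be_eliminated (points_dict.filter (fun p => p.1 ≠ firstName)) (some names1) (some lowest)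
termination_by points_dict.length
decreasing_by
  rcases points_dict with _ | ⟨p, rest⟩
  · simp at *
  · simp
    exact le_trans (List.length_filter_le _ _) (by simp)

-- ===== PORT B =====
def names_to_be_eliminated_alt (points_dict : List (String × Int)) (names : Option (List String)) (lowest_score : Option Int) : List String :=
  let names0 : PySem.Set String := names.getD PySem.Set.empty
  if points_dict.isEmpty then names0
  else
    let target : Int :=
      match lowest_score with
      -- min(points_dict.values()); the list is nonempty in this branch, so the default is never used
      | none => (PySem.List.min? (points_dict.map Prod.snd) (fun v => v)).getD 0
      | some l => l
    points_dict.foldl (fun acc q => if q.2 = target then PySem.Set.add acc q.1 else acc) names0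

-- ===== PRECONDITION & SPEC =====
-- Pre_ excludes association lists whose keys are not pairwise distinct: such a list does not
-- represent any Python dict (A's points_dict parameter is a dict, which can never hold a duplicate key).
def Pre_names_to_be_eliminated (points_dict : List (String × Int)) (names : Option (List String)) (lowest_score : Option Int) : Prop :=
  (points_dict.map Prod.fst).Nodup
instance (points_dict : List (String × Int)) (names : Option (List String)) (lowest_score : Option Int) : Decidable (Pre_names_to_be_eliminated points_dict names lowest_score) := by unfold Pre_names_to_be_eliminated; infer_instance

def pvWitness_names_to_be_eliminated : (List (String × Int)) × Option (List String) × Option Int :=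
  ([("ann", 3), ("bob", 1), ("cid", 1)], none, none)

def Spec_names_to_be_eliminated (points_dict : List (String × Int)) (names : Option (List String)) (lowest_score : Option Int) (out : List String) : Prop := out = names_to_be_eliminated_alt points_dict names lowest_score
instance (points_dict : List (String × Int)) (names : Option (List String)) (lowest_score : Option Int) (out : List String) : Decidable (Spec_names_to_be_eliminated points_dict names lowest_score out) := by unfold Spec_names_to_be_eliminated; infer_instance

-- ===== CLAIM (what is proved, stated in full; the proofs are below) =====
def Claim_equal_names_to_be_eliminated : Prop := ∀ (points_dict : List (String × Int)) (names : Option (List String)) (lowest_score : Option Int), Dom_names_to_be_eliminated points_dict names lowest_score → Pre_names_to_be_eliminated points_dict names lowest_score → Spec_names_to_be_eliminated points_dict names lowest_score (names_to_be_eliminated points_dict names lowest_score)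

-- ===== LEMMAS AND PROOFS =====

-- With a fixed threshold and duplicate-free keys, A's key-by-key recursion is the one-pass fold of B.
lemma A_eq_fold (pd : List (String × Int)) (acc : List String) (L : Int)
    (h : (pd.map Prod.fst).Nodup) :
    names_to_be_eliminated pd (some acc) (some L)
      = pd.foldl (fun a q => if q.2 = L then PySem.Set.add a q.1 else a) acc := by
  induction pd generalizing acc with
  | nil => rw [names_to_be_eliminated]; simp
  | cons p rest ih =>
    rw [names_to_be_eliminated]
    simp only [List.map_cons, List.nodup_cons, List.mem_map] at h
    have hfilt : List.filter (fun q => !decide (q.1 = p.1)) rest = rest := by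
      apply List.filter_eq_self.mpr
      intro q hq
      simp only [Bool.not_eq_eq_eq_not, Bool.not_true, decide_eq_false_iff_not]
      intro he
      exact h.1 ⟨q, hq, he⟩
    simp only [List.length_cons, List.map_cons, List.headI, List.filter_cons, ne_eq,
      decide_not, decide_true, Bool.not_true, List.foldl_cons, Nat.succ_ne_zero, if_false,
      Bool.false_eq_true, hfilt]
    exact ih _ h.2

-- A default `names=None` starts from the empty set.
lemma A_names_none (pd : List (String × Int)) (ls : Option Int) :
    names_to_be_eliminated pd none ls = names_to_be_eliminated pd (some []) ls := by
  rw [names_to_be_eliminated.eq_def, names_to_be_eliminated.eq_def]; rfl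

-- A's `if points <= lowest_score` running-minimum loop is a fold of `min` over the values.
lemma fold_min_eq (rest : List (String × Int)) (a : Int) :
    rest.foldl (fun acc q => if q.2 ≤ acc then q.2 else acc) a = (rest.map Prod.snd).foldl min a := by
  induction rest generalizing a with
  | nil => rfl
  | cons q t ih =>
    simp only [List.foldl_cons, List.map_cons]
    rw [ih]
    congr 1
    omega

-- … and therefore computes min(points_dict.values()), B's target.
lemma A_min_eq (p : String × Int) (rest : List (String × Int)) :
    (p :: rest).foldl (fun acc q => if q.2 ≤ acc then q.2 else acc) p.2
      = (PySem.List.min? ((p :: rest).map Prod.snd) (fun v => v)).getD 0 := by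
  simp only [List.map_cons, List.foldl_cons, le_refl, if_true]
  rw [PySem.List.min?_id_cons]
  simp only [Option.getD_some]
  exact fold_min_eq rest p.2

-- ===== VERDICT (by name: the statement is the Claim_ definition above) =====
theorem names_to_be_eliminated_spec : Claim_equal_names_to_be_eliminated := by
  intro pd names ls _dom hpre
  unfold Spec_names_to_be_eliminated
  have hstart : names_to_be_eliminated pd names ls
      = names_to_be_eliminated pd (some (names.getD [])) ls := by
    cases names
    · exact A_names_none pd ls
    · rfl
  rw [hstart]
  rcases pd with _ | ⟨p, rest⟩
  · rw [names_to_be_eliminated.eq_def]; simp [names_to_be_eliminated_alt]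
  · simp only [Pre_names_to_be_eliminated, List.map_cons, List.nodup_cons, List.mem_map] at hpre
    have hfilt : List.filter (fun q => !decide (q.1 = p.1)) rest = rest := by
      apply List.filter_eq_self.mpr
      intro q hq
      simp only [Bool.not_eq_eq_eq_not, Bool.not_true, decide_eq_false_iff_not]
      intro he
      exact hpre.1 ⟨q, hq, he⟩
    rcases ls with _ | L
    · rw [names_to_be_eliminated]
      simp only [List.length_cons, List.map_cons, List.headI, List.filter_cons, ne_eq,
        decide_not, decide_true, Bool.not_true, Nat.succ_ne_zero, if_false,
        Bool.false_eq_true, hfilt]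
      rw [A_eq_fold rest _ _ hpre.2]
      rw [A_min_eq p rest]
      simp [names_to_be_eliminated_alt, PySem.Set.empty]
    · rw [A_eq_fold _ _ _ (by simp only [List.map_cons, List.nodup_cons, List.mem_map]; exact hpre)]
      simp [names_to_be_eliminated_alt, PySem.Set.empty]
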